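-- pv_equiv track=rewrite | github.com/tvproductions/gzkit | src/gzkit/commands/validate_cmd.py | _resolve_scopes
-- ===== SOURCE A (Python) =====
-- def _resolve_scopes(checks: dict[str, bool]) -> list[str]:
--     """Build the list of validated scope names from the check flags."""
--     # "run_all" scopes activate when no explicit flag is set
--     run_all_scopes = [
--         "manifest",
--         "surfaces",
--         "ledger",
--         "instructions",
--         "briefs",
--         "documents",
--         "personas",
--         "version",
--     ]
--     # "opt-in" scopes only activate when explicitly requested
--     opt_in_scopes = ["interviews", "decomposition", "requirements", "commit_trailers"]
--
--     run_all = not any(checks.get(s, False) for s in run_all_scopes + opt_in_scopes)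
--     scopes: list[str] = []
--     for scope in run_all_scopes:
--         if run_all or checks.get(scope, False):
--             scopes.append(scope)
--     for scope in opt_in_scopes:
--         if checks.get(scope, False):
--             scopes.append(scope)
--     return scopes
-- ===== SOURCE B (Python) =====
-- def _resolve_scopes(checks: dict[str, bool]) -> list[str]:
--     """Build the list of validated scope names from the check flags."""
--     run_all_scopes = [
--         "manifest",
--         "surfaces",
--         "ledger",
--         "instructions",
--         "briefs",
--         "documents",
--         "personas",
--         "version",
--     ]
--     opt_in_scopes = ["interviews", "decomposition", "requirements", "commit_trailers"]
--     order = run_all_scopes + opt_in_scopes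
--     # one bit per known scope
--     bit = {s: 1 << i for i, s in enumerate(order)}
--     # single pass over the input: accumulate the set of requested scopes as a bitmask
--     mask = 0
--     for key, value in checks.items():
--         if value:
--             mask |= bit.get(key, 0)
--     if mask == 0:
--         return run_all_scopes
--     return [s for s in order if bit[s] & mask]
-- ===== Notes on version B (the rewrite author's own statement) =====
-- stated objective: alternative
-- what changed: Instead of probing checks.get once per scope name, B builds a scope->bit table, makes a single pass over the input dict accumulating a requested-scope bitmask, and then decodes the mask (empty mask falls back to the run_all list).
import Mathlib
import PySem

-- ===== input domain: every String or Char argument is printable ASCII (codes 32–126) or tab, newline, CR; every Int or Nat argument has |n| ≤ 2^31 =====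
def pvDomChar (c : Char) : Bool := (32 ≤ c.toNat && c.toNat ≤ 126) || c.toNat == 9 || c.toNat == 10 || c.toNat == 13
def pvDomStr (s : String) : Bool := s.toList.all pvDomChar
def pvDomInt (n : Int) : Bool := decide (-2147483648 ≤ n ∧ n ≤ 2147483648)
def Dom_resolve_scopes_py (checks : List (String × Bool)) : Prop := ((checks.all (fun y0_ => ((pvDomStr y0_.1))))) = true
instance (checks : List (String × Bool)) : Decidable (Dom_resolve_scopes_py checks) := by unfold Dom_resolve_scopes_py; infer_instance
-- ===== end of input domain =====

-- B replaces A's per-scope dict probing by a scope->bit table, one accumulating pass over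
-- the input building a requested-scope bitmask, and a decode of the mask (objective: alternative).

-- shared constants (the two literal lists both versions declare) and checks.get(s, False)
def pvRunAllScopes : List String :=
  ["manifest", "surfaces", "ledger", "instructions", "briefs", "documents", "personas", "version"]
def pvOptInScopes : List String :=
  ["interviews", "decomposition", "requirements", "commit_trailers"]
def pvGet (checks : List (String × Bool)) (s : String) : Bool :=
  (PySem.Dict.mk checks).getD s false

-- ===== PORT A =====
def resolve_scopes_py (checks : List (String × Bool)) : List String :=
  let run_all := !((pvRunAllScopes ++ pvOptInScopes).any (fun s => pvGet checks s))
  let scopes : List String :=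
    pvRunAllScopes.foldl (fun acc scope =>
      if run_all || pvGet checks scope then acc ++ [scope] else acc) []
  pvOptInScopes.foldl (fun acc scope =>
    if pvGet checks scope then acc ++ [scope] else acc) scopes

-- ===== PORT B =====
-- bit = {s: 1 << i for i, s in enumerate(order)} (enumerate indices are ≥ 0, so .toNat is exact)
def pvBit : PySem.Dict String Nat :=
  (PySem.List.enumerate (pvRunAllScopes ++ pvOptInScopes)).foldl
    (fun d p => d.insert p.2 (1 <<< p.1.toNat)) PySem.Dict.empty
-- the single pass 'for key, value in checks.items(): if value: mask |= bit.get(key, 0)'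
def pvMask (checks : List (String × Bool)) : Nat :=
  checks.foldl (fun m kv => if kv.2 then m ||| pvBit.getD kv.1 0 else m) 0

def resolve_scopes_py_alt (checks : List (String × Bool)) : List String :=
  let mask := pvMask checks
  if mask = 0 then pvRunAllScopes
  else (pvRunAllScopes ++ pvOptInScopes).filter (fun s => pvBit.getD s 0 &&& mask != 0)

-- ===== PRECONDITION & SPEC =====
-- Pre_ excludes association lists with duplicate keys: the argument stands for a Python dict,
-- which cannot hold two entries with the same key, so such lists correspond to no Python input
-- and first-match lookup versus accumulated-mask behaviour on them is accidental.
def Pre_resolve_scopes_py (checks : List (String × Bool)) : Prop :=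
  (checks.map Prod.fst).Nodup
instance (checks : List (String × Bool)) : Decidable (Pre_resolve_scopes_py checks) := by
  unfold Pre_resolve_scopes_py; infer_instance
def pvWitness_resolve_scopes_py : (List (String × Bool)) := [("manifest", true), ("foo", false)]

def Spec_resolve_scopes_py (checks : List (String × Bool)) (out : List String) : Prop := out = resolve_scopes_py_alt checks
instance (checks : List (String × Bool)) (out : List String) : Decidable (Spec_resolve_scopes_py checks out) := by unfold Spec_resolve_scopes_py; infer_instance

-- ===== CLAIM (what is proved, stated in full; the proofs are below) =====
def Claim_equal_resolve_scopes_py : Prop := ∀ (checks : List (String × Bool)), Dom_resolve_scopes_py checks → Pre_resolve_scopes_py checks → Spec_resolve_scopes_py checks (resolve_scopes_py checks)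

-- ===== LEMMAS AND PROOFS =====

theorem pvBit_eq : pvBit = PySem.Dict.mk
    [("manifest", 1), ("surfaces", 2), ("ledger", 4), ("instructions", 8),
     ("briefs", 16), ("documents", 32), ("personas", 64), ("version", 128),
     ("interviews", 256), ("decomposition", 512), ("requirements", 1024),
     ("commit_trailers", 2048)] := by decide
theorem pvBit_cases (k : String) :
    pvBit.getD k 0 = 0 ∨
    ∃ j, j < 12 ∧ pvBit.getD k 0 = 2 ^ j ∧ (pvRunAllScopes ++ pvOptInScopes).getD j "" = k := by
  by_cases hk : k ∈ pvRunAllScopes ++ pvOptInScopes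
  · fin_cases hk
    · exact Or.inr ⟨0, by norm_num, by decide, by decide⟩
    · exact Or.inr ⟨1, by norm_num, by decide, by decide⟩
    · exact Or.inr ⟨2, by norm_num, by decide, by decide⟩
    · exact Or.inr ⟨3, by norm_num, by decide, by decide⟩
    · exact Or.inr ⟨4, by norm_num, by decide, by decide⟩
    · exact Or.inr ⟨5, by norm_num, by decide, by decide⟩
    · exact Or.inr ⟨6, by norm_num, by decide, by decide⟩
    · exact Or.inr ⟨7, by norm_num, by decide, by decide⟩
    · exact Or.inr ⟨8, by norm_num, by decide, by decide⟩
    · exact Or.inr ⟨9, by norm_num, by decide, by decide⟩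
    · exact Or.inr ⟨10, by norm_num, by decide, by decide⟩
    · exact Or.inr ⟨11, by norm_num, by decide, by decide⟩
  · refine Or.inl (PySem.Dict.getD_of_not_contains pvBit 0 ?_)
    rw [pvBit_eq, PySem.Dict.contains_eq_decide_mem_keys]
    simp only [PySem.Dict.keys_mk]
    simp [pvRunAllScopes, pvOptInScopes] at hk
    simp [hk]

theorem pvMask_testBit (cs : List (String × Bool)) (m : Nat) (j : Nat) :
    (cs.foldl (fun m kv => if kv.2 then m ||| pvBit.getD kv.1 0 else m) m).testBit j
      = (m.testBit j || cs.any (fun kv => kv.2 && (pvBit.getD kv.1 0).testBit j)) := by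
  induction cs generalizing m with
  | nil => simp
  | cons kv rest ih =>
    simp only [List.foldl_cons, List.any_cons]
    rw [ih]
    by_cases hv : kv.2 <;> simp [hv, Nat.testBit_or, Bool.or_assoc]

theorem pvGet_eq_any (cs : List (String × Bool)) (s : String)
    (h : (cs.map Prod.fst).Nodup) :
    pvGet cs s = cs.any (fun kv => kv.1 == s && kv.2) := by
  induction cs with
  | nil => rfl
  | cons kv rest ih =>
    obtain ⟨k, v⟩ := kv
    simp only [List.map_cons, List.nodup_cons] at h
    simp only [pvGet, PySem.Dict.getD, PySem.Dict.get?_mk_cons, List.any_cons]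
    by_cases hks : k == s
    · have hs : k = s := eq_of_beq hks
      have hrest : rest.any (fun p => p.1 == s && p.2) = false := by
        rw [List.any_eq_false]
        intro p hp
        have : p.1 ≠ s := fun he => h.1 (by rw [hs, ← he]; exact List.mem_map_of_mem hp)
        simp [this]
      simp [hks, hrest]
    · rw [if_neg (by simp_all), ← ih h.2]
      simp [pvGet, PySem.Dict.getD, hks]

-- decidable facts about the 12 fixed scopes (Fin-bounded, so `decide` evaluates them)
theorem pvOrder_getD_mem : ∀ i : Fin 12,
    (pvRunAllScopes ++ pvOptInScopes).getD i.val "" ∈ pvRunAllScopes ++ pvOptInScopes := by decide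
theorem pvBit_order : ∀ i : Fin 12,
    pvBit.getD ((pvRunAllScopes ++ pvOptInScopes).getD i.val "") 0 = 2 ^ i.val := by decide
theorem pvOrder_ne : ∀ j i : Fin 12, j ≠ i →
    (((pvRunAllScopes ++ pvOptInScopes).getD j.val "" : String)
      == (pvRunAllScopes ++ pvOptInScopes).getD i.val "") = false := by decide

theorem pvAnd2P (i m : Nat) : (2 ^ i &&& m != 0) = m.testBit i := by
  cases h : m.testBit i <;> simp [Nat.two_pow_and, h]

theorem pvMask_high (checks : List (String × Bool)) (j : Nat) (hj : 12 ≤ j) :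
    (pvMask checks).testBit j = false := by
  unfold pvMask
  rw [pvMask_testBit]
  simp only [Nat.zero_testBit, Bool.false_or]
  rw [List.any_eq_false]
  intro kv _
  rcases pvBit_cases kv.1 with h0 | ⟨j', hj', hb, _⟩
  · simp [h0]
  · rw [hb]
    have : j' ≠ j := by omega
    simp [Nat.testBit_two_pow_of_ne this]

theorem pvMask_low (checks : List (String × Bool)) (h : (checks.map Prod.fst).Nodup)
    (i : Fin 12) :
    (pvMask checks).testBit i.val
      = pvGet checks ((pvRunAllScopes ++ pvOptInScopes).getD i.val "") := by
  unfold pvMask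
  rw [pvMask_testBit]
  simp only [Nat.zero_testBit, Bool.false_or]
  rw [pvGet_eq_any _ _ h]
  refine List.any_congr rfl (fun kv => ?_)
  rcases pvBit_cases kv.1 with h0 | ⟨j, hj, hb, hord⟩
  · have hne : kv.1 ≠ (pvRunAllScopes ++ pvOptInScopes).getD i.val "" := by
      intro hk
      rw [hk, pvBit_order i] at h0
      exact (Nat.pow_pos (n := i.val) (by norm_num : (0:Nat) < 2)).ne' h0
    simp [h0, Nat.zero_testBit]
    intro hk
    exact absurd hk hne
  · rw [hb, ← hord]
    by_cases hji : j = i.val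
    · subst hji
      simp [Nat.testBit_two_pow_self, Bool.and_comm]
    · rw [Nat.testBit_two_pow_of_ne hji,
        pvOrder_ne ⟨j, hj⟩ i (fun he => hji (congrArg Fin.val he))]
      simp

theorem pv_main (checks : List (String × Bool)) (hpre : (checks.map Prod.fst).Nodup) :
    resolve_scopes_py checks = resolve_scopes_py_alt checks := by
  by_cases hz : pvMask checks = 0
  · -- no flag set: both sides are the run_all list
    have hP : ∀ i : Fin 12,
        pvGet checks ((pvRunAllScopes ++ pvOptInScopes).getD i.val "") = false := by
      intro i
      rw [← pvMask_low checks hpre i, hz, Nat.zero_testBit]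
    have h0 : pvGet checks "manifest" = false := hP ⟨0, by norm_num⟩
    have h1 : pvGet checks "surfaces" = false := hP ⟨1, by norm_num⟩
    have h2 : pvGet checks "ledger" = false := hP ⟨2, by norm_num⟩
    have h3 : pvGet checks "instructions" = false := hP ⟨3, by norm_num⟩
    have h4 : pvGet checks "briefs" = false := hP ⟨4, by norm_num⟩
    have h5 : pvGet checks "documents" = false := hP ⟨5, by norm_num⟩
    have h6 : pvGet checks "personas" = false := hP ⟨6, by norm_num⟩
    have h7 : pvGet checks "version" = false := hP ⟨7, by norm_num⟩
    have h8 : pvGet checks "interviews" = false := hP ⟨8, by norm_num⟩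
    have h9 : pvGet checks "decomposition" = false := hP ⟨9, by norm_num⟩
    have h10 : pvGet checks "requirements" = false := hP ⟨10, by norm_num⟩
    have h11 : pvGet checks "commit_trailers" = false := hP ⟨11, by norm_num⟩
    simp [resolve_scopes_py, resolve_scopes_py_alt, hz, pvRunAllScopes, pvOptInScopes,
      List.any, h0, h1, h2, h3, h4, h5, h6, h7, h8, h9, h10, h11]
  · -- some flag set: A filters by the flags, B decodes the mask
    have hAny : (pvRunAllScopes ++ pvOptInScopes).any (fun s => pvGet checks s) = true := by
      by_contra hc
      have hall : ∀ s ∈ pvRunAllScopes ++ pvOptInScopes, pvGet checks s = false := by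
        rw [Bool.not_eq_true, List.any_eq_false] at hc
        intro s hs
        simpa using hc s hs
      apply hz
      apply Nat.eq_of_testBit_eq
      intro j
      simp only [Nat.zero_testBit]
      by_cases hj : j < 12
      · rw [show j = (⟨j, hj⟩ : Fin 12).val from rfl, pvMask_low checks hpre ⟨j, hj⟩]
        exact hall _ (pvOrder_getD_mem ⟨j, hj⟩)
      · exact pvMask_high checks j (by omega)
    have hcond : ∀ s ∈ pvRunAllScopes ++ pvOptInScopes,
        (pvBit.getD s 0 &&& pvMask checks != 0) = pvGet checks s := by
      intro s hs
      have e : ∀ i : Fin 12,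
          (pvBit.getD ((pvRunAllScopes ++ pvOptInScopes).getD i.val "") 0 &&& pvMask checks != 0)
            = pvGet checks ((pvRunAllScopes ++ pvOptInScopes).getD i.val "") := fun i => by
        rw [pvBit_order i, pvAnd2P, pvMask_low checks hpre i]
      fin_cases hs
      · exact e 0
      · exact e 1
      · exact e 2
      · exact e 3
      · exact e 4
      · exact e 5
      · exact e 6
      · exact e 7
      · exact e 8
      · exact e 9
      · exact e 10
      · exact e 11
    simp only [resolve_scopes_py, resolve_scopes_py_alt, hAny, Bool.not_true, Bool.false_or,
      PySem.List.foldl_append_if_eq_filter, List.nil_append, if_neg hz]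
    rw [List.filter_congr hcond, List.filter_append]


-- ===== VERDICT (by name: the statement is the Claim_ definition above) =====
theorem resolve_scopes_py_spec : Claim_equal_resolve_scopes_py := by
  intro checks _ hpre
  unfold Spec_resolve_scopes_py
  exact pv_main checks hpre
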